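-- pv_equiv track=rewrite | github.com/MulongXie/Research-ReverselyGeneratingWebCode | code/MODULE/img_processing/project/ip_detection.py | get_boundary
-- ===== SOURCE A (Python) =====
-- def get_boundary(area):
--     border_up, border_bottom, border_left, border_right = ({}, {}, {}, {})
--     for point in area:
--         # point: (row_index, column_index)
--         # up, bottom: (column_index, min/max row border) detect range of each column
--         if point[1] not in border_up or border_up[point[1]] > point[0]:
--             border_up[point[1]] = point[0]
--         if point[1] not in border_bottom or border_bottom[point[1]] < point[0]:
--             border_bottom[point[1]] = point[0]
--         # left, right: (row_index, min/max column border) detect range of each row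
--         if point[0] not in border_left or border_left[point[0]] > point[1]:
--             border_left[point[0]] = point[1]
--         if point[0] not in border_right or border_right[point[0]] < point[1]:
--             border_right[point[0]] = point[1]
--
--     boundary = [border_up, border_bottom, border_left, border_right]
--     for i in range(len(boundary)):
--         boundary[i] = sorted(boundary[i].items(), key=lambda x: x[0])
--
--     return boundary
-- ===== SOURCE B (Python) =====
-- def get_boundary(area):
--     # group the points: column -> list of rows, row -> list of columns
--     cols, rows = {}, {}
--     for point in area:
--         cols.setdefault(point[1], []).append(point[0])
--         rows.setdefault(point[0], []).append(point[1])
--     # reduce each group to its min/max extent, sorted by key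
--     border_up = sorted(((c, min(v)) for c, v in cols.items()), key=lambda x: x[0])
--     border_bottom = sorted(((c, max(v)) for c, v in cols.items()), key=lambda x: x[0])
--     border_left = sorted(((r, min(v)) for r, v in rows.items()), key=lambda x: x[0])
--     border_right = sorted(((r, max(v)) for r, v in rows.items()), key=lambda x: x[0])
--     return [border_up, border_bottom, border_left, border_right]
-- ===== Notes on version B (the rewrite author's own statement) =====
-- stated objective: alternative
-- what changed: Replaces the four running-min/max dicts maintained inside the point loop by a group-collect-then-reduce decomposition: one pass builds column->rows and row->cols group lists, a second pass takes min/max of each group and sorts by key.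
import Mathlib
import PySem

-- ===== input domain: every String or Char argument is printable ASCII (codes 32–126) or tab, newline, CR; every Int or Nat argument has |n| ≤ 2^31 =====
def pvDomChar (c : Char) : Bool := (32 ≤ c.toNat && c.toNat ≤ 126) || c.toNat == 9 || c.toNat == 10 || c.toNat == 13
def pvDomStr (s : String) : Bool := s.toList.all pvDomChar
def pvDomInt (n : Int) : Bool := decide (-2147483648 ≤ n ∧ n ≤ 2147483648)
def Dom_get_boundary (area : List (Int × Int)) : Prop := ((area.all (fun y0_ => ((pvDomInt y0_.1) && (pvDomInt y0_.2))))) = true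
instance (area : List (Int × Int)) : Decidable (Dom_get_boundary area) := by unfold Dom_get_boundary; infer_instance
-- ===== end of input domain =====

-- B replaces A's four running-min/max dicts by group-collect (column->rows, row->cols) then
-- per-group min/max reduction, sorted by key: a different two-pass decomposition, same cost.


-- ===== PORT A =====
def get_boundary (area : List (Int × Int)) : List (List (Int × Int)) :=
  let r := area.foldl (fun s point =>
      (if !s.1.contains point.2 || decide (s.1.getD point.2 0 > point.1) then s.1.insert point.2 point.1 else s.1,
       if !s.2.1.contains point.2 || decide (s.2.1.getD point.2 0 < point.1) then s.2.1.insert point.2 point.1 else s.2.1,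
       if !s.2.2.1.contains point.1 || decide (s.2.2.1.getD point.1 0 > point.2) then s.2.2.1.insert point.1 point.2 else s.2.2.1,
       if !s.2.2.2.contains point.1 || decide (s.2.2.2.getD point.1 0 < point.2) then s.2.2.2.insert point.1 point.2 else s.2.2.2))
    ((PySem.Dict.empty : PySem.Dict Int Int), (PySem.Dict.empty : PySem.Dict Int Int),
     (PySem.Dict.empty : PySem.Dict Int Int), (PySem.Dict.empty : PySem.Dict Int Int))
  let boundary := [r.1, r.2.1, r.2.2.1, r.2.2.2]
  boundary.map (fun d => PySem.List.sorted d.items (fun x => x.1) false)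

-- ===== PORT B =====
-- groups are always nonempty, so '.getD 0' after min?/max? is exact for Python's min/max
def get_boundary_alt (area : List (Int × Int)) : List (List (Int × Int)) :=
  let r := area.foldl (fun s point =>
      (s.1.modify point.2 [] (fun l => l ++ [point.1]),
       s.2.modify point.1 [] (fun l => l ++ [point.2])))
    ((PySem.Dict.empty : PySem.Dict Int (List Int)), (PySem.Dict.empty : PySem.Dict Int (List Int)))
  let cols := r.1
  let rows := r.2
  [PySem.List.sorted (cols.items.map (fun q => (q.1, (PySem.List.min? q.2 (fun x => x)).getD 0))) (fun x => x.1) false,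
   PySem.List.sorted (cols.items.map (fun q => (q.1, (PySem.List.max? q.2 (fun x => x)).getD 0))) (fun x => x.1) false,
   PySem.List.sorted (rows.items.map (fun q => (q.1, (PySem.List.min? q.2 (fun x => x)).getD 0))) (fun x => x.1) false,
   PySem.List.sorted (rows.items.map (fun q => (q.1, (PySem.List.max? q.2 (fun x => x)).getD 0))) (fun x => x.1) false]

-- ===== PRECONDITION & SPEC =====
def Spec_get_boundary (area : List (Int × Int)) (out : List (List (Int × Int))) : Prop := out = get_boundary_alt area
instance (area : List (Int × Int)) (out : List (List (Int × Int))) : Decidable (Spec_get_boundary area out) := by unfold Spec_get_boundary; infer_instance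

-- ===== CLAIM (what is proved, stated in full; the proofs are below) =====
def Claim_equal_get_boundary : Prop := ∀ (area : List (Int × Int)), Dom_get_boundary area → Spec_get_boundary area (get_boundary area)

-- ===== LEMMAS AND PROOFS =====

def pvStepA (cmp : Int → Int → Bool) (kf vf : (Int × Int) → Int) (m : PySem.Dict Int Int) (p : Int × Int) : PySem.Dict Int Int :=
  if !m.contains (kf p) || cmp (m.getD (kf p) 0) (vf p) then m.insert (kf p) (vf p) else m

def pvStepB (kf vf : (Int × Int) → Int) (g : PySem.Dict Int (List Int)) (p : Int × Int) : PySem.Dict Int (List Int) :=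
  g.modify (kf p) [] (fun l => l ++ [vf p])

def pvRed (cmp : Int → Int → Bool) (vs : List Int) : Option Int :=
  vs.foldl (fun acc x => match acc with | none => some x | some m => if cmp m x then some x else some m) none

lemma pvRed_append (cmp : Int → Int → Bool) (vs : List Int) (v : Int) :
    pvRed cmp (vs ++ [v]) = match pvRed cmp vs with
      | none => some v
      | some m => if cmp m v then some v else some m := by
  simp [pvRed, List.foldl_append]

lemma pvRed_isSome_aux (cmp : Int → Int → Bool) (xs : List Int) (m : Int) :
    (xs.foldl (fun acc x => match acc with | none => some x | some m => if cmp m x then some x else some m) (some m)).isSome := by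
  induction xs generalizing m with
  | nil => rfl
  | cons y ys ih => simp only [List.foldl_cons]; split <;> exact ih _

lemma pvRed_isSome (cmp : Int → Int → Bool) (vs : List Int) (h : vs ≠ []) : (pvRed cmp vs).isSome := by
  cases vs with
  | nil => exact absurd rfl h
  | cons x xs => exact pvRed_isSome_aux cmp xs x

lemma pvMain (cmp : Int → Int → Bool) (kf vf : (Int × Int) → Int) (l : List (Int × Int)) :
    (l.foldl (pvStepA cmp kf vf) PySem.Dict.empty).keys = (l.foldl (pvStepB kf vf) PySem.Dict.empty).keys ∧
    (l.foldl (pvStepA cmp kf vf) PySem.Dict.empty).keys.Nodup ∧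
    (∀ k, k ∈ (l.foldl (pvStepB kf vf) PySem.Dict.empty).keys ↔ (l.foldl (pvStepB kf vf) PySem.Dict.empty).getD k [] ≠ []) ∧
    (∀ k, (l.foldl (pvStepA cmp kf vf) PySem.Dict.empty).getD k 0
        = (pvRed cmp ((l.foldl (pvStepB kf vf) PySem.Dict.empty).getD k [])).getD 0) := by
  induction l using List.reverseRecOn with
  | nil =>
      refine ⟨rfl, ?_, ?_, ?_⟩ <;> simp [PySem.Dict.keys_empty, PySem.Dict.getD_empty, pvRed]
  | append_singleton xs p ih =>
      obtain ⟨hk, hnd, hne, hv⟩ := ih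
      set M := xs.foldl (pvStepA cmp kf vf) PySem.Dict.empty with hM
      set G := xs.foldl (pvStepB kf vf) PySem.Dict.empty with hG
      rw [List.foldl_append, List.foldl_append]
      simp only [List.foldl_cons, List.foldl_nil]
      have hkeysG' : (pvStepB kf vf G p).keys =
          if kf p ∈ G.keys then G.keys else G.keys ++ [kf p] := by
        by_cases hc : kf p ∈ G.keys
        · rw [pvStepB, PySem.Dict.keys_modify,
            PySem.Dict.keys_insert_of_contains _ _ ((PySem.Dict.contains_iff_mem_keys G (kf p)).mpr hc), if_pos hc]
        · have : G.contains (kf p) = false := by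
            rcases Bool.eq_false_or_eq_true (G.contains (kf p)) with h | h
            · exact absurd ((PySem.Dict.contains_iff_mem_keys G (kf p)).mp h) hc
            · exact h
          rw [pvStepB, PySem.Dict.keys_modify, PySem.Dict.keys_insert_of_not_contains _ _ this, if_neg hc]
      have hgd : ∀ k', (pvStepB kf vf G p).getD k' [] =
          if k' = kf p then G.getD (kf p) [] ++ [vf p] else G.getD k' [] := by
        intro k'; rw [pvStepB, PySem.Dict.getD_modify]
      by_cases hc : kf p ∈ G.keys
      · -- key already present
        have hcM : M.contains (kf p) = true :=
          (PySem.Dict.contains_iff_mem_keys M (kf p)).mpr (hk ▸ hc)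
        have hvs : G.getD (kf p) [] ≠ [] := (hne (kf p)).mp hc
        obtain ⟨m0, hm0⟩ : ∃ m0, pvRed cmp (G.getD (kf p) []) = some m0 :=
          Option.isSome_iff_exists.mp (pvRed_isSome cmp _ hvs)
        have hm0v : M.getD (kf p) 0 = m0 := by rw [hv (kf p), hm0]; rfl
        have hred : ∀ k', (pvRed cmp ((pvStepB kf vf G p).getD k' [])).getD 0
            = if k' = kf p then (if cmp m0 (vf p) then vf p else m0) else (pvRed cmp (G.getD k' [])).getD 0 := by
          intro k'
          rw [hgd k']
          by_cases hkk : k' = kf p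
          · rw [if_pos hkk, if_pos hkk, pvRed_append, hm0]
            cases hcv : cmp m0 (vf p) <;> simp [hcv]
          · rw [if_neg hkk, if_neg hkk]
        by_cases hcmp : cmp (M.getD (kf p) 0) (vf p)
        · -- A overwrites
          have hA : pvStepA cmp kf vf M p = M.insert (kf p) (vf p) := by
            rw [pvStepA, if_pos]; rw [hcM, hcmp]; rfl
          refine ⟨?_, ?_, ?_, ?_⟩
          · rw [hA, PySem.Dict.keys_insert_of_contains _ _ hcM, hkeysG', if_pos hc, hk]
          · rw [hA, PySem.Dict.keys_insert_of_contains _ _ hcM]; exact hnd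
          · intro k'
            rw [hkeysG', if_pos hc, hgd k']
            by_cases hkk : k' = kf p
            · subst hkk; simp [hc]
            · rw [if_neg hkk]; exact hne k'
          · intro k'
            rw [hA, PySem.Dict.getD_insert, hred k']
            by_cases hkk : k' = kf p
            · rw [if_pos hkk, if_pos hkk, if_pos (hm0v ▸ hcmp)]
            · rw [if_neg hkk, if_neg hkk]; exact hv k'
        · -- A keeps the old extremum
          have hA : pvStepA cmp kf vf M p = M := by
            have hcmpf : cmp (M.getD (kf p) 0) (vf p) = false := Bool.eq_false_iff.mpr hcmp
            rw [pvStepA, if_neg]; rw [hcM, hcmpf]; simp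
          refine ⟨?_, ?_, ?_, ?_⟩
          · rw [hA, hkeysG', if_pos hc, hk]
          · rw [hA]; exact hnd
          · intro k'
            rw [hkeysG', if_pos hc, hgd k']
            by_cases hkk : k' = kf p
            · subst hkk; simp [hc]
            · rw [if_neg hkk]; exact hne k'
          · intro k'
            rw [hA, hred k']
            by_cases hkk : k' = kf p
            · rw [if_pos hkk]
              have : cmp m0 (vf p) = false := by
                rcases Bool.eq_false_or_eq_true (cmp m0 (vf p)) with h | h
                · exact absurd (hm0v ▸ h) (by simpa using hcmp)
                · exact h
              rw [this, hkk, hm0v]; rfl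
            · rw [if_neg hkk]; exact hv k'
      · -- fresh key
        have hcM : M.contains (kf p) = false := by
          rcases Bool.eq_false_or_eq_true (M.contains (kf p)) with h | h
          · exact absurd (hk ▸ (PySem.Dict.contains_iff_mem_keys M (kf p)).mp h) hc
          · exact h
        have hA : pvStepA cmp kf vf M p = M.insert (kf p) (vf p) := by
          rw [pvStepA, if_pos]; rw [hcM]; rfl
        have hvs : G.getD (kf p) [] = [] := by
          by_contra hne'
          exact hc ((hne (kf p)).mpr hne')
        refine ⟨?_, ?_, ?_, ?_⟩
        · rw [hA, PySem.Dict.keys_insert_of_not_contains _ _ hcM, hkeysG', if_neg hc, hk]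
        · rw [hA, PySem.Dict.keys_insert_of_not_contains _ _ hcM]
          simp only [List.nodup_append, List.nodup_cons, List.nodup_nil]
          exact ⟨hnd, by simp, by intro a ha b hb; simp only [List.mem_singleton] at hb; subst hb; exact fun h => hc (hk ▸ h ▸ ha)⟩
        · intro k'
          rw [hkeysG', if_neg hc, hgd k']
          by_cases hkk : k' = kf p
          · subst hkk; simp [hvs]
          · rw [if_neg hkk]; simp only [List.mem_append, List.mem_singleton, hkk, or_false]
            exact hne k'
        · intro k'
          rw [hA, PySem.Dict.getD_insert, hgd k']
          by_cases hkk : k' = kf p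
          · rw [if_pos hkk, if_pos hkk, hvs]
            rfl
          · rw [if_neg hkk, if_neg hkk]; exact hv k'

lemma pvItems (cmp : Int → Int → Bool) (kf vf : (Int × Int) → Int) (l : List (Int × Int)) :
    (l.foldl (pvStepA cmp kf vf) PySem.Dict.empty).items
      = (l.foldl (pvStepB kf vf) PySem.Dict.empty).items.map (fun q => (q.1, (pvRed cmp q.2).getD 0)) := by
  obtain ⟨hk, hnd, _, hv⟩ := pvMain cmp kf vf l
  rw [PySem.Dict.items_eq_map_keys _ hnd 0,
      PySem.Dict.items_eq_map_keys _ (hk ▸ hnd) ([] : List Int), List.map_map, hk]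
  refine List.map_congr_left (fun k _ => ?_)
  simp only [Function.comp_apply]
  rw [hv k]

lemma pvFoldlProd4 {β σ₁ σ₂ σ₃ σ₄ : Type} (f1 : σ₁ → β → σ₁) (f2 : σ₂ → β → σ₂) (f3 : σ₃ → β → σ₃) (f4 : σ₄ → β → σ₄)
    (l : List β) (a : σ₁) (b : σ₂) (c : σ₃) (d : σ₄) :
    l.foldl (fun s e => (f1 s.1 e, f2 s.2.1 e, f3 s.2.2.1 e, f4 s.2.2.2 e)) (a, b, c, d)
      = (l.foldl f1 a, l.foldl f2 b, l.foldl f3 c, l.foldl f4 d) := by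
  induction l generalizing a b c d with
  | nil => rfl
  | cons x xs ih => simp only [List.foldl_cons]; exact ih _ _ _ _

lemma pvMinRed (vs : List Int) : PySem.List.min? vs (fun x => x) = pvRed (fun a b => decide (a > b)) vs := by
  simp only [PySem.List.min?, pvRed]; congr 1; funext acc x; cases acc <;> simp [gt_iff_lt]

lemma pvMaxRed (vs : List Int) : PySem.List.max? vs (fun x => x) = pvRed (fun a b => decide (a < b)) vs := by
  simp only [PySem.List.max?, pvRed]; congr 1; funext acc x; cases acc <;> simp

lemma pvA_split (area : List (Int × Int)) :
    get_boundary area =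
      [PySem.List.sorted (area.foldl (pvStepA (fun a b => decide (a > b)) (fun p => p.2) (fun p => p.1)) PySem.Dict.empty).items (fun x => x.1) false,
       PySem.List.sorted (area.foldl (pvStepA (fun a b => decide (a < b)) (fun p => p.2) (fun p => p.1)) PySem.Dict.empty).items (fun x => x.1) false,
       PySem.List.sorted (area.foldl (pvStepA (fun a b => decide (a > b)) (fun p => p.1) (fun p => p.2)) PySem.Dict.empty).items (fun x => x.1) false,
       PySem.List.sorted (area.foldl (pvStepA (fun a b => decide (a < b)) (fun p => p.1) (fun p => p.2)) PySem.Dict.empty).items (fun x => x.1) false] := by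
  have h := pvFoldlProd4 (f1 := pvStepA (fun a b => decide (a > b)) (fun p => p.2) (fun p => p.1))
    (f2 := pvStepA (fun a b => decide (a < b)) (fun p => p.2) (fun p => p.1))
    (f3 := pvStepA (fun a b => decide (a > b)) (fun p => p.1) (fun p => p.2))
    (f4 := pvStepA (fun a b => decide (a < b)) (fun p => p.1) (fun p => p.2))
    area PySem.Dict.empty PySem.Dict.empty PySem.Dict.empty PySem.Dict.empty
  simp only [pvStepA] at h
  unfold get_boundary
  rw [h]; rfl

lemma pvB_split (area : List (Int × Int)) :
    get_boundary_alt area =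
      [PySem.List.sorted ((area.foldl (pvStepB (fun p => p.2) (fun p => p.1)) PySem.Dict.empty).items.map (fun q => (q.1, (pvRed (fun a b => decide (a > b)) q.2).getD 0))) (fun x => x.1) false,
       PySem.List.sorted ((area.foldl (pvStepB (fun p => p.2) (fun p => p.1)) PySem.Dict.empty).items.map (fun q => (q.1, (pvRed (fun a b => decide (a < b)) q.2).getD 0))) (fun x => x.1) false,
       PySem.List.sorted ((area.foldl (pvStepB (fun p => p.1) (fun p => p.2)) PySem.Dict.empty).items.map (fun q => (q.1, (pvRed (fun a b => decide (a > b)) q.2).getD 0))) (fun x => x.1) false,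
       PySem.List.sorted ((area.foldl (pvStepB (fun p => p.1) (fun p => p.2)) PySem.Dict.empty).items.map (fun q => (q.1, (pvRed (fun a b => decide (a < b)) q.2).getD 0))) (fun x => x.1) false] := by
  have h := PySem.List.foldl_prod_mk (f := pvStepB (fun p => (p : Int × Int).2) (fun p => p.1))
    (g := pvStepB (fun p => p.1) (fun p => p.2)) area PySem.Dict.empty PySem.Dict.empty
  simp only [pvStepB] at h
  unfold get_boundary_alt
  rw [h]
  simp only [pvMinRed, pvMaxRed]

-- ===== VERDICT (by name: the statement is the Claim_ definition above) =====
theorem get_boundary_spec : Claim_equal_get_boundary := by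
  intro area _
  unfold Spec_get_boundary
  rw [pvA_split, pvB_split, pvItems, pvItems, pvItems, pvItems]
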